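-- pv_equiv track=rewrite | github.com/codeking01/python_project | Src/Python_project/Python_Task/Task/arithmetic/utils/writeToSmiles.py | find_side_list
-- ===== SOURCE A (Python) =====
-- def find_side_list(graph=None, original_side_list=None):
--     """
--     :param graph: 无环图
--     :param original_side_list: 侧链的序列
--     :return: side_set_list（侧链的集合）
--     """
--     # 存储所有侧链的集合列表
--     side_set_list = []
--     temp_set_list = []
--     # 找侧链的集合列表
--     for index in range(0, len(original_side_list)):
--         if index != len(original_side_list) - 1:
--             # 没进去的话，先进一个
--             if original_side_list[index] not in temp_set_list:
--                 temp_set_list.append(original_side_list[index])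
--             # 找相邻的两个原子是否有直接连接关系，有则放一起
--             if original_side_list[index] in graph[original_side_list[index + 1]]:
--                 temp_set_list.append(original_side_list[index + 1])
--             else:
--                 side_set_list.append(temp_set_list)
--                 temp_set_list = []
--         else:
--             # 如果前面的原子和最后一个原子不相连，只需要加一下这个原子就行
--             if len(temp_set_list) == 0:
--                 temp_set_list.append(original_side_list[index])
--             side_set_list.append(temp_set_list)
--             return side_set_list
-- ===== SOURCE B (Python) =====
-- def find_side_list(graph=None, original_side_list=None):
--     n = len(original_side_list)
--     if n == 0:
--         return None
--     # cut positions: boundary after index i whenever consecutive atoms are not connected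
--     cuts = [i + 1 for i in range(n - 1)
--             if original_side_list[i] not in graph[original_side_list[i + 1]]]
--     bounds = [0] + cuts + [n]
--     # groups are slices between consecutive boundaries
--     return [original_side_list[a:b] for a, b in zip(bounds, bounds[1:])]
-- ===== Notes on version B (the rewrite author's own statement) =====
-- stated objective: alternative
-- what changed: B has no group accumulator at all: it first computes the list of cut positions (boundaries where consecutive atoms are not connected) and then returns the slices of the original list between consecutive boundaries, replacing A's single index loop that grows a temp group, tests membership on it and returns from inside the loop.
-- outside the precondition, e.g. on find_side_list({}, []): A returns None, B returns None
import Mathlib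
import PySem

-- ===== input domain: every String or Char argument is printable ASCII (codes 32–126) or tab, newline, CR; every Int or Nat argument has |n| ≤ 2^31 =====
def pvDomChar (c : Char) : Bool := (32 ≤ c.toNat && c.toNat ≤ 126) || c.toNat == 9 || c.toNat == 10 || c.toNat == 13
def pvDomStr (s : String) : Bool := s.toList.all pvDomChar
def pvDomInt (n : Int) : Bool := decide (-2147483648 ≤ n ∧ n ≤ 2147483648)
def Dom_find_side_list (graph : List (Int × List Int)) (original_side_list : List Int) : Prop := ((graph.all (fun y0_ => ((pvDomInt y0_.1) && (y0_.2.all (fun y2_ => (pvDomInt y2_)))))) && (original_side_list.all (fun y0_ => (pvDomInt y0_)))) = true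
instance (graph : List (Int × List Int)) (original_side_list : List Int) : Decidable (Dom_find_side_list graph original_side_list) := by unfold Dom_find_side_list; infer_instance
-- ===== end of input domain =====

-- B computes the cut positions (indices where consecutive atoms are not connected) and returns
-- the slices of the list between consecutive boundaries, instead of A's accumulator loop with
-- membership test and in-loop return; equivalence proved on Pre_.


-- dict indexing graph[k]: first-match association-list lookup (Pre_ guarantees the key exists)
def pvLookup (graph : List (Int × List Int)) (k : Int) : List Int :=
  (graph.lookup k).getD []

-- ===== PORT A =====
-- the loop 'for index in range(0, len(original_side_list))' with early return, as fuel recursion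
-- (fuel = number of remaining indices); off-Pre_ fallthrough (empty list, Python returns None) gives []
def pvGoA (graph : List (Int × List Int)) (osl : List Int) :
    Nat → Nat → List (List Int) → List Int → List (List Int)
  | 0, _, _, _ => []
  | fuel + 1, index, side_set_list, temp_set_list =>
    if index ≠ osl.length - 1 then
      let cur := (PySem.List.pyGet? osl (index : Int)).getD 0
      let nxt := (PySem.List.pyGet? osl ((index : Int) + 1)).getD 0
      let temp1 := if cur ∈ temp_set_list then temp_set_list else temp_set_list ++ [cur]
      if cur ∈ pvLookup graph nxt then
        pvGoA graph osl fuel (index + 1) side_set_list (temp1 ++ [nxt])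
      else
        pvGoA graph osl fuel (index + 1) (side_set_list ++ [temp1]) []
    else
      let cur := (PySem.List.pyGet? osl (index : Int)).getD 0
      let temp1 := if temp_set_list.length = 0 then temp_set_list ++ [cur] else temp_set_list
      side_set_list ++ [temp1]

def find_side_list (graph : List (Int × List Int)) (original_side_list : List Int) : List (List Int) :=
  pvGoA graph original_side_list original_side_list.length 0 [] []

-- ===== PORT B =====
-- the comprehension condition 'original_side_list[i] not in graph[original_side_list[i+1]]'
def pvConnP (graph : List (Int × List Int)) (osl : List Int) (i : Nat) : Bool :=
  decide (((PySem.List.pyGet? osl (i : Int)).getD 0) ∈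
    pvLookup graph ((PySem.List.pyGet? osl ((i : Int) + 1)).getD 0))

-- cuts = [i + 1 for i in range(n - 1) if ... not in ...]
def pvCuts (graph : List (Int × List Int)) (osl : List Int) : List Int :=
  ((List.range (osl.length - 1)).filter (fun i => !pvConnP graph osl i)).map
    (fun i => (i : Int) + 1)

def find_side_list_alt (graph : List (Int × List Int)) (original_side_list : List Int) : List (List Int) :=
  if original_side_list.length = 0 then []   -- Python B returns None here; outside Pre_
  else
    let bounds : List Int := 0 :: (pvCuts graph original_side_list ++ [(original_side_list.length : Int)])
    (bounds.zip bounds.tail).map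
      (fun ab => PySem.List.slice original_side_list (some ab.1) (some ab.2))

-- ===== PRECONDITION & SPEC =====
-- Pre_ excludes (a) the empty list, where A falls through and returns None — not a value of the
-- declared list type — and (b) lists whose tail contains an atom that is not a key of graph,
-- where A raises KeyError (B raises there too).
def Pre_find_side_list (graph : List (Int × List Int)) (original_side_list : List Int) : Prop :=
  original_side_list ≠ [] ∧ ∀ x ∈ original_side_list.tail, (graph.lookup x).isSome

instance (graph : List (Int × List Int)) (original_side_list : List Int) : Decidable (Pre_find_side_list graph original_side_list) := by unfold Pre_find_side_list; infer_instance

def pvWitness_find_side_list : (List (Int × List Int)) × List Int :=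
  ([(1, [0]), (2, [5]), (0, [1])], [0, 1, 2, 0])

def Spec_find_side_list (graph : List (Int × List Int)) (original_side_list : List Int) (out : List (List Int)) : Prop := out = find_side_list_alt graph original_side_list
instance (graph : List (Int × List Int)) (original_side_list : List Int) (out : List (List Int)) : Decidable (Spec_find_side_list graph original_side_list out) := by unfold Spec_find_side_list; infer_instance

-- ===== CLAIM (what is proved, stated in full; the proofs are below) =====
def Claim_equal_find_side_list : Prop := ∀ (graph : List (Int × List Int)) (original_side_list : List Int), Dom_find_side_list graph original_side_list → Pre_find_side_list graph original_side_list → Spec_find_side_list graph original_side_list (find_side_list graph original_side_list)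

-- ===== LEMMAS AND PROOFS =====

-- proof-only helpers: cuts restricted to indices ≥ s, and the slice-building second phase
def pvCutsFrom (graph : List (Int × List Int)) (osl : List Int) (s : Nat) : List Int :=
  ((List.range' s (osl.length - 1 - s)).filter (fun i => !pvConnP graph osl i)).map
    (fun i => (i : Int) + 1)

def pvSliceGroups (osl : List Int) (bounds : List Int) : List (List Int) :=
  (bounds.zip bounds.tail).map (fun ab => PySem.List.slice osl (some ab.1) (some ab.2))

theorem pvSliceGroups_cons (osl : List Int) (a b : Int) (rest : List Int) :
    pvSliceGroups osl (a :: b :: rest) =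
      PySem.List.slice osl (some a) (some b) :: pvSliceGroups osl (b :: rest) := by
  simp [pvSliceGroups]

theorem pvCutsFrom_zero (graph : List (Int × List Int)) (osl : List Int) :
    pvCutsFrom graph osl 0 = pvCuts graph osl := by
  simp [pvCutsFrom, pvCuts, List.range_eq_range']

theorem pvCutsFrom_step (graph : List (Int × List Int)) (osl : List Int) (index : Nat)
    (h : index < osl.length - 1) :
    pvCutsFrom graph osl index =
      if pvConnP graph osl index then pvCutsFrom graph osl (index + 1)
      else ((index : Int) + 1) :: pvCutsFrom graph osl (index + 1) := by
  have hr : List.range' index (osl.length - 1 - index) =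
      index :: List.range' (index + 1) (osl.length - 1 - (index + 1)) := by
    have : osl.length - 1 - index = (osl.length - 1 - (index + 1)) + 1 := by omega
    rw [this, List.range'_succ]
  unfold pvCutsFrom
  rw [hr]
  by_cases hc : pvConnP graph osl index <;> simp [hc]

theorem pvCutsFrom_last (graph : List (Int × List Int)) (osl : List Int) (s : Nat)
    (h : osl.length - 1 ≤ s) : pvCutsFrom graph osl s = [] := by
  unfold pvCutsFrom
  have : osl.length - 1 - s = 0 := by omega
  simp [this]

-- main loop correspondence: at iteration `index` the current group started at `s`
theorem pvGoA_eq (graph : List (Int × List Int)) (osl : List Int) :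
    ∀ (fuel index s : Nat) (side : List (List Int)) (temp : List Int),
    fuel + index = osl.length → index < osl.length → s ≤ index →
    ((temp = [] ∧ s = index) ∨ temp = (osl.drop s).take (index + 1 - s)) →
    pvGoA graph osl fuel index side temp =
      side ++ pvSliceGroups osl ((s : Int) :: (pvCutsFrom graph osl index ++ [(osl.length : Int)])) := by
  intro fuel
  induction fuel with
  | zero => intro index s side temp hlen hidx _ _; omega
  | succ f ih =>
    intro index s side temp hlen hidx hs hinv
    have hcur : (PySem.List.pyGet? osl (index : Int)).getD 0 = osl[index]'hidx := by
      rw [PySem.List.pyGet?_natCast]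
      simp [List.getElem?_eq_getElem hidx]
    -- temp1 after the membership / len==0 steps is the slice from s through index
    have htake : (osl.drop s).take (index + 1 - s) =
        (osl.drop s).take (index - s) ++ [osl[index]'hidx] := by
      have h1 : index + 1 - s = (index - s) + 1 := by omega
      have h2 : index - s < (osl.drop s).length := by simp [List.length_drop]; omega
      rw [h1, List.take_add_one, List.getElem?_eq_getElem h2]
      simp [List.getElem_drop, Nat.add_sub_cancel' hs]
    have hmem : osl[index]'hidx ∈ (osl.drop s).take (index + 1 - s) := by
      rw [htake]; simp
    by_cases hlast : index = osl.length - 1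
    · -- last iteration: return side ++ [temp1]
      have hcf : pvCutsFrom graph osl index = [] := pvCutsFrom_last graph osl index (by omega)
      have htemp1 : (if temp.length = 0 then temp ++ [(PySem.List.pyGet? osl (index : Int)).getD 0] else temp) =
          (osl.drop s).take (index + 1 - s) := by
        rcases hinv with ⟨h1, h2⟩ | h1
        · subst h1; subst h2
          have hss : s + 1 - s = 1 := by omega
          rw [hss, List.take_one, List.head?_drop, List.getElem?_eq_getElem hidx]
          simp [List.getElem?_eq_getElem hidx]
        · have hne : temp ≠ [] := by
            rw [h1]; intro hnil
            rw [hnil] at hmem; simp at hmem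
          rw [if_neg (by simpa [List.length_eq_zero_iff] using hne), h1]
      have hsl : PySem.List.slice osl (some (s : Int)) (some (osl.length : Int)) =
          (osl.drop s).take (index + 1 - s) := by
        rw [PySem.List.slice_natCast]
        congr 1
        have : index + 1 = osl.length := by omega
        omega
      simp only [pvGoA, if_neg (by omega : ¬ index ≠ osl.length - 1)]
      rw [htemp1, hcf]
      simp [pvSliceGroups, hsl]
    · -- inner iteration
      have hidx1 : index + 1 < osl.length := by omega
      have hnxt : (PySem.List.pyGet? osl ((index : Int) + 1)).getD 0 = osl[index + 1]'hidx1 := by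
        have : ((index : Int) + 1) = ((index + 1 : Nat) : Int) := by push_cast; ring
        rw [this, PySem.List.pyGet?_natCast]
        simp [List.getElem?_eq_getElem hidx1]
      have htemp1 : (if ((PySem.List.pyGet? osl (index : Int)).getD 0) ∈ temp then temp
          else temp ++ [(PySem.List.pyGet? osl (index : Int)).getD 0]) =
          (osl.drop s).take (index + 1 - s) := by
        rcases hinv with ⟨h1, h2⟩ | h1
        · subst h1; subst h2
          have hss : s + 1 - s = 1 := by omega
          rw [hss, List.take_one, List.head?_drop, List.getElem?_eq_getElem hidx]
          simp [List.getElem?_eq_getElem hidx]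
        · rw [h1, if_pos (by rw [hcur]; exact h1 ▸ (h1 ▸ hmem))]
      have hconn : pvConnP graph osl index =
          decide (osl[index]'hidx ∈ pvLookup graph (osl[index + 1]'hidx1)) := by
        unfold pvConnP; rw [hcur, hnxt]
      have hext : (osl.drop s).take (index + 1 - s) ++ [osl[index + 1]'hidx1] =
          (osl.drop s).take (index + 1 + 1 - s) := by
        have h1 : index + 1 + 1 - s = (index + 1 - s) + 1 := by omega
        have h2 : index + 1 - s < (osl.drop s).length := by simp [List.length_drop]; omega
        rw [h1, List.take_add_one, List.getElem?_eq_getElem h2]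
        simp [List.getElem_drop]
        congr 1
        omega
      simp only [pvGoA, if_pos (by omega : index ≠ osl.length - 1), htemp1]
      rw [pvCutsFrom_step graph osl index (by omega)]
      by_cases hc : osl[index]'hidx ∈ pvLookup graph (osl[index + 1]'hidx1)
      · rw [if_pos (by rw [hcur, hnxt]; exact hc), if_pos (by rw [hconn]; simpa using hc)]
        rw [hnxt, hext]
        exact ih (index + 1) s side _ (by omega) (by omega) (by omega) (Or.inr rfl)
      · rw [if_neg (by rw [hcur, hnxt]; exact hc), if_neg (by rw [hconn]; simpa using hc)]
        rw [ih (index + 1) (index + 1) (side ++ [(osl.drop s).take (index + 1 - s)]) []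
          (by omega) (by omega) (by omega) (Or.inl ⟨rfl, rfl⟩)]
        have hsl : PySem.List.slice osl (some (s : Int)) (some ((index : Int) + 1)) =
            (osl.drop s).take (index + 1 - s) := by
          have : ((index : Int) + 1) = ((index + 1 : Nat) : Int) := by push_cast; ring
          rw [this, PySem.List.slice_natCast]
        rw [List.cons_append, pvSliceGroups_cons, hsl]
        simp

-- ===== VERDICT (by name: the statement is the Claim_ definition above) =====
theorem find_side_list_spec : Claim_equal_find_side_list := by
  intro graph osl _ hpre
  unfold Spec_find_side_list find_side_list find_side_list_alt
  obtain ⟨hne, -⟩ := hpre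
  have hlen : 0 < osl.length := List.length_pos_iff.mpr hne
  rw [if_neg (by omega)]
  rw [pvGoA_eq graph osl osl.length 0 0 [] [] (by omega) hlen (le_refl 0) (Or.inl ⟨rfl, rfl⟩)]
  rw [pvCutsFrom_zero]
  simp [pvSliceGroups]
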